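-- pv_equiv track=rewrite | github.com/ilayq/kontur_test_task | sol/2/2.py | max_positive_subsequence
-- ===== SOURCE A (Python) =====
-- from typing import Iterable
--
-- def max_positive_subsequence(nums: Iterable) -> int:
--     max_length = 0
--     cur_l = 0
--     for num in nums:
--         if num > 0:
--             cur_l += 1
--             max_length = max(max_length, cur_l)
--         else:
--             max_length = max(max_length, cur_l)
--             cur_l = 0
--     return max_length
-- ===== SOURCE B (Python) =====
-- from itertools import groupby
--
-- def max_positive_subsequence(nums) -> int:
--     return max((sum(1 for _ in g) for k, g in groupby(nums, key=lambda x: x > 0) if k),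
--                default=0)
-- ===== Notes on version B (the rewrite author's own statement) =====
-- stated objective: idiomatic
-- what changed: Replaces the manual running counter/maximum with a group-then-reduce decomposition: itertools.groupby splits the input into maximal sign-runs, and the answer is the max of the lengths of the positive runs (default 0).
import Mathlib
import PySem

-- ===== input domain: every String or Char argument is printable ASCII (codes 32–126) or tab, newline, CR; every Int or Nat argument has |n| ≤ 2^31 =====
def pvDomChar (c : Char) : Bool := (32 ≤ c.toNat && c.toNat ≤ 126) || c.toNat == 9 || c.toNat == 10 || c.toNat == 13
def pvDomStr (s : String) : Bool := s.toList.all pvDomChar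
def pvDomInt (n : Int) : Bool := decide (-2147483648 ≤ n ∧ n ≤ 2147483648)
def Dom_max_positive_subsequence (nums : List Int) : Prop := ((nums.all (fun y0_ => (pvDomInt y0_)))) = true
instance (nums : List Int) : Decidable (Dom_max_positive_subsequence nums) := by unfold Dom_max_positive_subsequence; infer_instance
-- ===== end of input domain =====

-- B replaces A's running counter/maximum with a group-then-reduce decomposition (groupby into
-- maximal sign-runs, then max of the positive runs' lengths); same O(n) cost, more idiomatic.


-- ===== PORT A =====
-- literal port: for-loop over nums with state (max_length, cur_l)
def max_positive_subsequence (nums : List Int) : Int :=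
  (nums.foldl
    (fun (st : Int × Int) num =>
      if num > 0 then (max st.1 (st.2 + 1), st.2 + 1)
      else (max st.1 st.2, 0))
    (0, 0)).1

-- ===== PORT B =====
-- hand port of itertools.groupby specialised to key = (x > 0): the list of (key, group length)
-- for the maximal runs of equal key, in order (exact for this use of groupby).
def pyGroupby (nums : List Int) : List (Bool × Nat) :=
  match nums with
  | [] => []
  | x :: xs =>
    match pyGroupby xs with
    | [] => [(decide (x > 0), 1)]
    | (k, n) :: rest =>
      if decide (x > 0) = k then (k, n + 1) :: rest
      else (decide (x > 0), 1) :: (k, n) :: rest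

-- max(lengths of groups with key True, default=0)
def max_positive_subsequence_alt (nums : List Int) : Int :=
  (((pyGroupby nums).filter (fun p => p.1)).map (fun p => (p.2 : Int))).foldl max 0

-- ===== PRECONDITION & SPEC =====
def Spec_max_positive_subsequence (nums : List Int) (out : Int) : Prop := out = max_positive_subsequence_alt nums
instance (nums : List Int) (out : Int) : Decidable (Spec_max_positive_subsequence nums out) := by unfold Spec_max_positive_subsequence; infer_instance

-- ===== CLAIM (what is proved, stated in full; the proofs are below) =====
def Claim_equal_max_positive_subsequence : Prop := ∀ (nums : List Int), Dom_max_positive_subsequence nums → Spec_max_positive_subsequence nums (max_positive_subsequence nums)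

-- ===== LEMMAS AND PROOFS =====

-- reference semantics: (max run length of positives, leading run length of positives)
def runSpec (nums : List Int) : Int × Int :=
  match nums with
  | [] => (0, 0)
  | x :: xs =>
    let (m, l) := runSpec xs
    if x > 0 then (max m (l + 1), l + 1) else (m, 0)

theorem runSpec_bounds (nums : List Int) :
    0 ≤ (runSpec nums).2 ∧ (runSpec nums).2 ≤ (runSpec nums).1 := by
  induction nums with
  | nil => simp [runSpec]
  | cons x xs ih =>
    simp only [runSpec]
    obtain ⟨h1, h2⟩ := ih
    split <;> simp_all <;> omega

theorem loopA_eq (nums : List Int) :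
    ∀ m c : Int, 0 ≤ c → c ≤ m →
      (nums.foldl
        (fun (st : Int × Int) num =>
          if num > 0 then (max st.1 (st.2 + 1), st.2 + 1)
          else (max st.1 st.2, 0))
        (m, c)).1 = max m (max (c + (runSpec nums).2) (runSpec nums).1) := by
  induction nums with
  | nil => intro m c h1 h2; simp [runSpec]; omega
  | cons x xs ih =>
    intro m c h1 h2
    obtain ⟨b1, b2⟩ := runSpec_bounds xs
    simp only [List.foldl_cons, runSpec]
    by_cases hx : x > 0
    · simp only [hx, if_pos]
      rw [ih (max m (c + 1)) (c + 1) (by omega) (by omega)]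
      rcases h : runSpec xs with ⟨M, L⟩
      rw [h] at b1 b2
      simp only [h]
      omega
    · simp only [hx, if_neg, if_false]
      rw [ih (max m c) 0 (by omega) (by omega)]
      rcases h : runSpec xs with ⟨M, L⟩
      rw [h] at b1 b2
      simp only [h]
      omega

theorem foldl_max_shift (l : List Int) (a b : Int) :
    l.foldl max (max a b) = max a (l.foldl max b) := by
  induction l generalizing b with
  | nil => simp
  | cons c l ih => simp only [List.foldl_cons, max_assoc, ih]

-- value of B's reduction on a cons
def bestOf (l : List (Bool × Nat)) : Int :=
  ((l.filter (fun p => p.1)).map (fun p => (p.2 : Int))).foldl max 0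

theorem bestOf_cons_true (n : Nat) (rest : List (Bool × Nat)) :
    bestOf ((true, n) :: rest) = max (n : Int) (bestOf rest) := by
  simp only [bestOf, List.filter_cons]
  norm_num
  rw [← foldl_max_shift _ (n : Int) 0]
  congr 1
  omega

theorem pyGroupby_eq_nil (nums : List Int) (h : pyGroupby nums = []) : nums = [] := by
  cases nums with
  | nil => rfl
  | cons x xs =>
    exfalso
    simp only [pyGroupby] at h
    rcases hg : pyGroupby xs with _ | ⟨⟨k, n⟩, rest⟩ <;> rw [hg] at h
    · simp at h
    · split at h <;> simp at h
      split at h <;> simp at h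

theorem bestOf_cons_false (n : Nat) (rest : List (Bool × Nat)) :
    bestOf ((false, n) :: rest) = bestOf rest := by
  simp [bestOf]

-- the grouping computes runSpec: bestOf = max run length, and the head group describes the leading run
theorem groupby_spec (nums : List Int) :
    bestOf (pyGroupby nums) = (runSpec nums).1 ∧
    (match pyGroupby nums with
     | [] => (runSpec nums).2 = 0
     | (k, n) :: _ => if k then ((n : Int) = (runSpec nums).2) else (runSpec nums).2 = 0) := by
  induction nums with
  | nil => simp [pyGroupby, runSpec, bestOf]
  | cons x xs ih =>
    obtain ⟨ihb, ihh⟩ := ih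
    obtain ⟨b1, b2⟩ := runSpec_bounds xs
    rcases h : runSpec xs with ⟨M, L⟩
    rw [h] at ihb ihh b1 b2
    simp only [pyGroupby, runSpec, h]
    rcases hg : pyGroupby xs with _ | ⟨⟨k, n⟩, rest⟩ <;> rw [hg] at ihb ihh
    · have hxs := pyGroupby_eq_nil xs hg
      subst hxs
      simp only [runSpec] at h
      injection h with hM hL
      subst hM; subst hL
      by_cases hx : x > 0 <;>
        simp [hx, bestOf_cons_true, bestOf_cons_false, bestOf]
    · simp only at b1 b2
      by_cases hx : x > 0
      · simp only [hx, if_pos, decide_true]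
        cases k
        · simp only [Bool.true_eq_false, Bool.false_eq_true, reduceIte] at ihh ⊢
          rw [bestOf_cons_false] at ihb
          rw [bestOf_cons_true, bestOf_cons_false, ihb]
          refine ⟨by omega, ?_⟩
          push_cast
          omega
        · simp only [reduceIte] at ihh ⊢
          rw [bestOf_cons_true] at ihb
          rw [bestOf_cons_true]
          push_cast at ihh ⊢
          constructor <;> omega
      · simp only [hx, if_false, decide_false]
        cases k
        · simp only [Bool.false_eq_true, reduceIte] at ihh ⊢
          rw [bestOf_cons_false] at ihb
          rw [bestOf_cons_false]
          exact ⟨ihb, trivial⟩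
        · simp only [Bool.false_eq_true, Bool.true_eq_false, reduceIte] at ihh ⊢
          rw [bestOf_cons_true] at ihb
          rw [bestOf_cons_false, bestOf_cons_true, ihb]
          exact ⟨rfl, trivial⟩

-- ===== VERDICT (by name: the statement is the Claim_ definition above) =====
theorem max_positive_subsequence_spec : Claim_equal_max_positive_subsequence := by
  intro nums _
  unfold Spec_max_positive_subsequence max_positive_subsequence
  obtain ⟨hb, _⟩ := groupby_spec nums
  obtain ⟨b1, b2⟩ := runSpec_bounds nums
  rw [loopA_eq nums 0 0 le_rfl le_rfl]
  show _ = max_positive_subsequence_alt nums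
  unfold max_positive_subsequence_alt
  rw [show (((pyGroupby nums).filter (fun p => p.1)).map (fun p => (p.2 : Int))).foldl max 0 = bestOf (pyGroupby nums) from rfl, hb]
  omega
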